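-- pv_equiv track=rewrite | github.com/xforce-io/milkie | tools/metric_painter.py | extractConfigKeysWithSameVal
-- ===== SOURCE A (Python) =====
-- def extractConfigKeysWithSameVal(jsonObjs :list[dict]):
--     configKeys = jsonObjs[0]["config"].keys()
--     configKeysWithSameVal = []
--     for key in configKeys:
--         if key == "benchmarks":
--             continue
--
--         if all([jsonObj["config"][key] == jsonObjs[0]["config"][key] for jsonObj in jsonObjs]):
--             configKeysWithSameVal.append(key)
--     return configKeysWithSameVal
-- ===== SOURCE B (Python) =====
-- def extractConfigKeysWithSameVal(jsonObjs :list[dict]):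
--     # recursive decomposition: a recursive key collector with a recursive
--     # per-key "same value in all remaining objects" check
--     first = jsonObjs[0]["config"]
--
--     def survives(key, objs):
--         if not objs:
--             return True
--         return objs[0]["config"][key] == first[key] and survives(key, objs[1:])
--
--     def collect(keys):
--         if not keys:
--             return []
--         rest = collect(keys[1:])
--         k = keys[0]
--         if k != "benchmarks" and survives(k, jsonObjs[1:]):
--             return [k] + rest
--         return rest
--
--     return collect(list(first.keys()))
-- ===== Notes on version B (the rewrite author's own statement) =====
-- stated objective: alternative
-- what changed: Replaced A's single loop with all()-comprehension by a recursive decomposition: a structurally recursive key collector plus a recursive per-key check over the remaining objects (the first object is not re-compared against itself).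
import Mathlib
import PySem

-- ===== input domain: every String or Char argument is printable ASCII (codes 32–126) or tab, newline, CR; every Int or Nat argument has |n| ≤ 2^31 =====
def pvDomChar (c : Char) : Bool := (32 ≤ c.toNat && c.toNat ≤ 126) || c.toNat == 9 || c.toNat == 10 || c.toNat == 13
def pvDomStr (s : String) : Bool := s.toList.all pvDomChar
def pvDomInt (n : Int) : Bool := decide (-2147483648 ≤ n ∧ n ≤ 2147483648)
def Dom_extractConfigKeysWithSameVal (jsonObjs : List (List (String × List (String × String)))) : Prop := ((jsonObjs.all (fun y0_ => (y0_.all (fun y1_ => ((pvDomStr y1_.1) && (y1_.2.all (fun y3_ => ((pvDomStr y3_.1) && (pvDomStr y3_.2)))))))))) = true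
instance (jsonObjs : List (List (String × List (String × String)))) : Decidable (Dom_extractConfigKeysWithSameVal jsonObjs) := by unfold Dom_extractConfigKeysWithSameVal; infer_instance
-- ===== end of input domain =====

-- B is a recursive decomposition (recursive key collector + recursive per-key check over the remaining objects); return values proven equal on Pre_.

-- ===== PORT A =====
def extractConfigKeysWithSameVal (jsonObjs : List (List (String × List (String × String)))) : List String :=
  let cfg0 := ((jsonObjs.head?.getD []).lookup "config").getD []
  let configKeys := cfg0.map (fun kv => kv.1)
  configKeys.foldl (fun acc key =>
    if key == "benchmarks" then acc
    else if jsonObjs.all (fun jsonObj =>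
        ((jsonObj.lookup "config").getD []).lookup key == cfg0.lookup key)
      then acc ++ [key] else acc) []

-- ===== PORT B =====
-- survives(key, objs): recursive check that every remaining object agrees with first on key
def pvSurvives (first : List (String × String)) (key : String) :
    List (List (String × List (String × String))) → Bool
  | [] => true
  | o :: os =>
      (((o.lookup "config").getD []).lookup key == first.lookup key) && pvSurvives first key os

-- collect(keys): recursive collector over the first object's key list
def pvCollect (first : List (String × String))
    (objs : List (List (String × List (String × String)))) : List String → List String
  | [] => []
  | k :: ks =>
      let rest := pvCollect first objs ks
      if (k != "benchmarks") && pvSurvives first k objs then k :: rest else rest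

def extractConfigKeysWithSameVal_alt (jsonObjs : List (List (String × List (String × String)))) : List String :=
  let first := ((jsonObjs.head?.getD []).lookup "config").getD []
  pvCollect first (jsonObjs.drop 1) (first.map (fun kv => kv.1))

-- ===== PRECONDITION & SPEC =====
-- Pre_ excludes exactly the inputs where Python A raises: empty jsonObjs (IndexError) and
-- objects missing the "config" key or missing a non-"benchmarks" key of the first config (KeyError).
def Pre_extractConfigKeysWithSameVal (jsonObjs : List (List (String × List (String × String)))) : Prop :=
  jsonObjs ≠ [] ∧
  ∀ obj ∈ jsonObjs, (obj.lookup "config").isSome ∧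
    ∀ kv ∈ ((jsonObjs.head?.getD []).lookup "config").getD [], kv.1 ≠ "benchmarks" →
      (((obj.lookup "config").getD []).lookup kv.1).isSome

instance (jsonObjs : List (List (String × List (String × String)))) : Decidable (Pre_extractConfigKeysWithSameVal jsonObjs) := by unfold Pre_extractConfigKeysWithSameVal; infer_instance

def pvWitness_extractConfigKeysWithSameVal : (List (List (String × List (String × String)))) :=
  ([[("config", [("a", "1"), ("benchmarks", "z")])], [("config", [("a", "1")])]])

def Spec_extractConfigKeysWithSameVal (jsonObjs : List (List (String × List (String × String)))) (out : List String) : Prop := out = extractConfigKeysWithSameVal_alt jsonObjs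
instance (jsonObjs : List (List (String × List (String × String)))) (out : List String) : Decidable (Spec_extractConfigKeysWithSameVal jsonObjs out) := by unfold Spec_extractConfigKeysWithSameVal; infer_instance

-- ===== CLAIM =====
def Claim_equal_extractConfigKeysWithSameVal : Prop := ∀ (jsonObjs : List (List (String × List (String × String)))), Dom_extractConfigKeysWithSameVal jsonObjs → Pre_extractConfigKeysWithSameVal jsonObjs → Spec_extractConfigKeysWithSameVal jsonObjs (extractConfigKeysWithSameVal jsonObjs)

-- ===== LEMMAS AND PROOFS =====

theorem foldl_skip_append {α : Type} (p q : α → Bool) :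
    ∀ (l : List α) (acc : List α),
      l.foldl (fun acc k => if p k then acc else if q k then acc ++ [k] else acc) acc
        = acc ++ l.filter (fun k => !p k && q k) := by
  intro l
  induction l with
  | nil => simp
  | cons x xs ih =>
      intro acc
      by_cases hp : p x = true <;> by_cases hq : q x = true <;>
        simp [List.foldl_cons, hp, hq, ih]

theorem a_loop_eq_filter (objs : List (List (String × List (String × String))))
    (cfg0 : List (String × String)) (l acc : List String) :
    l.foldl (fun acc key =>
        if key == "benchmarks" then acc
        else if objs.all (fun jsonObj =>
            ((jsonObj.lookup "config").getD []).lookup key == cfg0.lookup key)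
          then acc ++ [key] else acc) acc
      = acc ++ l.filter (fun key =>
          !(key == "benchmarks") && objs.all (fun jsonObj =>
            ((jsonObj.lookup "config").getD []).lookup key == cfg0.lookup key)) :=
  foldl_skip_append (fun key => key == "benchmarks")
    (fun key => objs.all (fun jsonObj =>
      ((jsonObj.lookup "config").getD []).lookup key == cfg0.lookup key)) l acc

theorem survives_eq_all (first : List (String × String)) (key : String) :
    ∀ objs, pvSurvives first key objs
      = objs.all (fun jsonObj =>
          ((jsonObj.lookup "config").getD []).lookup key == first.lookup key) := by
  intro objs
  induction objs with
  | nil => rfl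
  | cons o os ih => simp [pvSurvives, ih, List.all_cons]

theorem collect_eq_filter (first : List (String × String))
    (objs : List (List (String × List (String × String)))) :
    ∀ keys, pvCollect first objs keys
      = keys.filter (fun k => (k != "benchmarks") && pvSurvives first k objs) := by
  intro keys
  induction keys with
  | nil => rfl
  | cons k ks ih =>
      by_cases h : ((k != "benchmarks") && pvSurvives first k objs) = true <;>
        simp [pvCollect, ih, h]

-- ===== VERDICT =====
theorem extractConfigKeysWithSameVal_spec : Claim_equal_extractConfigKeysWithSameVal := by
  intro jsonObjs _ hpre
  unfold Spec_extractConfigKeysWithSameVal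
  obtain ⟨hne, -⟩ := hpre
  cases jsonObjs with
  | nil => exact absurd rfl hne
  | cons h t =>
      simp only [extractConfigKeysWithSameVal, extractConfigKeysWithSameVal_alt,
        List.head?_cons, Option.getD_some, List.drop_succ_cons, List.drop_zero]
      have ha := a_loop_eq_filter (h :: t) ((List.lookup "config" h).getD [])
        (List.map (fun kv => kv.1) ((List.lookup "config" h).getD [])) []
      refine ha.trans ?_
      rw [collect_eq_filter, List.nil_append]
      apply List.filter_congr
      intro k _
      simp [survives_eq_all, List.all_cons, bne]
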